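-- pv_equiv track=rewrite | github.com/vicnaum/shinode | scripts/draw_bitset.py | visualize
-- ===== SOURCE A (Python) =====
-- def visualize(bits: list[bool], width: int = 100, shard: int = 0) -> str:
--     """Create ASCII visualization of bitset.
--
--     Uses Unicode block characters:
--     - █ (full block) = fetched
--     - ░ (light shade) = not fetched
--     """
--     total = len(bits)
--     height = (total + width - 1) // width
--
--     # Calculate padding for row labels (max block number width)
--     max_block = shard + (height - 1) * width
--     label_width = len(str(max_block))
--
--     # Build column ticks (every 10 columns)
--     tick_line = " " * label_width + " "
--     for col in range(0, width, 10):
--         tick_line += f"{col:<10}"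
--     tick_line = tick_line.rstrip()
--
--     lines = [tick_line]
--
--     for row in range(height):
--         block_start = shard + row * width
--         label = f"{block_start:>{label_width}} "
--         line = label
--         for col in range(width):
--             idx = row * width + col
--             if idx < total:
--                 line += "█" if bits[idx] else "░"
--             else:
--                 line += " "
--         lines.append(line)
--
--     # Bottom ticks
--     lines.append(tick_line)
--
--     return "\n".join(lines)
-- ===== SOURCE B (Python) =====
-- def visualize(bits: list[bool], width: int = 100, shard: int = 0) -> str:
--     """Simpler: map all bits to block chars in one pass, slice into width-sized
--     rows with ljust padding, instead of a per-cell loop with a bounds check."""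
--     total = len(bits)
--     height = (total + width - 1) // width
--     max_block = shard + (height - 1) * width
--     label_width = len(str(max_block))
--     tick_line = (" " * label_width + " "
--                  + "".join(f"{col:<10}" for col in range(0, width, 10))).rstrip()
--     cells = "".join("█" if b else "░" for b in bits)
--     body = [f"{shard + row * width:>{label_width}} "
--             + cells[row * width:row * width + width].ljust(width)
--             for row in range(height)]
--     return "\n".join([tick_line] + body + [tick_line])
-- ===== Notes on version B (the rewrite author's own statement) =====
-- stated objective: simpler
-- what changed: Replaces the nested per-row/per-cell loop with its idx<total bounds check by one pass mapping bits to block characters, then slicing that flat string into width-sized chunks padded with ljust (also a constant-factor speedup from bulk string slicing instead of per-character concatenation); the tick line is built by a join of a comprehension instead of string accumulation.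
import Mathlib
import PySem

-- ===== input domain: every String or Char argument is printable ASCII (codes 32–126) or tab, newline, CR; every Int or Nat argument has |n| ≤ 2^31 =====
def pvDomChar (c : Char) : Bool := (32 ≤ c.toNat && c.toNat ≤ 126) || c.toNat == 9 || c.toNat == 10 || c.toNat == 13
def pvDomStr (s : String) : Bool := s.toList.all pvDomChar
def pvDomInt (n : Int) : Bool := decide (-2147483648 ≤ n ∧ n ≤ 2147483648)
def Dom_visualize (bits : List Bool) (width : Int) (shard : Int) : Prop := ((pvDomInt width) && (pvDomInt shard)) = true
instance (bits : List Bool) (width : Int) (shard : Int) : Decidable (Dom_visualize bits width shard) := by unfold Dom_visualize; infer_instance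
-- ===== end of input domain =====

-- B builds each row by slicing a flat list of block characters and padding with ljust,
-- instead of A's per-cell loop with an explicit bounds check (objective: simpler).

-- shared f-string helpers: f"{x:>{w}}" pads on the left, f"{x:<{w}}" / str.ljust pad on the right
def pyRJust (w : Int) (cs : List Char) : List Char :=
  List.replicate (w - cs.length).toNat ' ' ++ cs

def pyLJust (w : Int) (cs : List Char) : List Char :=
  cs ++ List.replicate (w - cs.length).toNat ' '

-- ===== PORT A =====
-- one data row of A: label then the per-column loop (bits[idx] is read only under the
-- guard idx < total with idx = row*width + col ≥ 0, so pyGetD with default false is exact)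
def rowLineA (bits : List Bool) (width : Int) (shard : Int) (labelWidth : Int) (row : Int) : List Char :=
  let blockStart := shard + row * width
  let label := pyRJust labelWidth (PySem.Int.toChars blockStart) ++ [' ']
  (PySem.List.pyRange 0 width 1).foldl
    (fun line col =>
      let idx := row * width + col
      if idx < (bits.length : Int) then
        line ++ [if PySem.List.pyGetD bits idx false then '█' else '░']
      else
        line ++ [' ']) label

def visualize (bits : List Bool) (width : Int) (shard : Int) : String :=
  let total : Int := bits.length
  let height := PySem.Int.floordiv (total + width - 1) width
  let maxBlock := shard + (height - 1) * width
  let labelWidth : Int := (PySem.Int.toChars maxBlock).length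
  let tickLine := PySem.Chars.rstrip
    ((PySem.List.pyRange 0 width 10).foldl
      (fun acc col => acc ++ pyLJust 10 (PySem.Int.toChars col))
      (List.replicate labelWidth.toNat ' ' ++ [' ']))
  let lines := (PySem.List.pyRange 0 height 1).foldl
    (fun ls row => ls ++ [rowLineA bits width shard labelWidth row]) [tickLine]
  String.ofList (PySem.Chars.join ['\n'] (lines ++ [tickLine]))

-- ===== PORT B =====
def cellChar (b : Bool) : Char := if b then '█' else '░'

def visualize_alt (bits : List Bool) (width : Int) (shard : Int) : String :=
  let total : Int := bits.length
  let height := PySem.Int.floordiv (total + width - 1) width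
  let maxBlock := shard + (height - 1) * width
  let labelWidth : Int := (PySem.Int.toChars maxBlock).length
  let tickLine := PySem.Chars.rstrip
    (List.replicate labelWidth.toNat ' ' ++ [' ']
      ++ PySem.Chars.join [] ((PySem.List.pyRange 0 width 10).map
          (fun col => pyLJust 10 (PySem.Int.toChars col))))
  let cells := bits.map cellChar
  let body := (PySem.List.pyRange 0 height 1).map (fun row =>
    pyRJust labelWidth (PySem.Int.toChars (shard + row * width)) ++ [' ']
      ++ pyLJust width (PySem.List.slice cells (some (row * width)) (some (row * width + width))))
  String.ofList (PySem.Chars.join ['\n'] ([tickLine] ++ body ++ [tickLine]))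

-- ===== PRECONDITION & SPEC =====
-- Pre_ excludes only width = 0, where the Python A raises ZeroDivisionError.
def Pre_visualize (bits : List Bool) (width : Int) (shard : Int) : Prop := width ≠ 0
instance (bits : List Bool) (width : Int) (shard : Int) : Decidable (Pre_visualize bits width shard) := by unfold Pre_visualize; infer_instance
def pvWitness_visualize : List Bool × Int × Int := ([true, false, true], 2, 5)

def Spec_visualize (bits : List Bool) (width : Int) (shard : Int) (out : String) : Prop := out = visualize_alt bits width shard
instance (bits : List Bool) (width : Int) (shard : Int) (out : String) : Decidable (Spec_visualize bits width shard out) := by unfold Spec_visualize; infer_instance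

-- ===== CLAIM (what is proved, stated in full; the proofs are below) =====
def Claim_equal_visualize : Prop := ∀ (bits : List Bool) (width : Int) (shard : Int), Dom_visualize bits width shard → Pre_visualize bits width shard → Spec_visualize bits width shard (visualize bits width shard)

-- ===== LEMMAS AND PROOFS =====

-- "".join(parts) is flatten
theorem join_empty_sep (l : List (List Char)) : PySem.Chars.join [] l = l.flatten := by
  induction l with
  | nil => simp [PySem.Chars.join_nil]
  | cons p rest ih =>
    cases rest with
    | nil => simp [PySem.Chars.join, List.intercalate]
    | cons q t => rw [PySem.Chars.join_cons_cons, List.flatten_cons, ← ih]; simp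

-- the core per-row fact on the Nat side
theorem row_core (bits : List Bool) (s w : ℕ) :
    (List.range w).map
        (fun k => if s + k < bits.length then (if bits.getD (s + k) false then '█' else '░') else ' ')
      = ((bits.map cellChar).drop s).take w
          ++ List.replicate (w - (bits.length - s)) ' ' := by
  apply List.ext_getElem
  · simp [List.length_take, List.length_drop]
    omega
  · intro k h1 h2
    have hk : k < w := by simpa using h1
    have hlen : (((bits.map cellChar).drop s).take w).length = min w (bits.length - s) := by
      simp [List.length_take, List.length_drop]
    by_cases hc : s + k < bits.length
    · have hk2 : k < (((bits.map cellChar).drop s).take w).length := by rw [hlen]; omega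
      rw [List.getElem_append_left hk2]
      simp [List.getElem_take, List.getElem_drop, cellChar, hc]
    · have hk2 : ¬ k < (((bits.map cellChar).drop s).take w).length := by rw [hlen]; omega
      rw [List.getElem_append_right (by omega)]
      simp [hc]

-- Python's m % w has the divisor's sign: for w < 0 it is ≤ 0
theorem mod_nonpos_of_neg (a w : ℤ) (hw : w < 0) : PySem.Int.mod a w ≤ 0 := by
  have h1 : PySem.Int.mod (-(-a)) (-(-w)) = -PySem.Int.mod (-a) (-w) := PySem.Int.mod_neg_neg (-a) (-w)
  simp only [neg_neg] at h1
  rw [h1]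
  have h2 : PySem.Int.mod (-a) (-w) = (-a) % (-w) := PySem.Int.mod_eq_emod_of_pos (by omega)
  have h3 : 0 ≤ (-a) % (-w) := Int.emod_nonneg _ (by omega)
  omega

-- a row slice is empty for a short row below a negative-width grid
theorem slice_nil_of_short {α : Type} (xs : List α) {a w : ℤ} (hw : w < 0) (ha : a ≤ 0)
    (hn : (xs.length : ℤ) ≤ a + 1) :
    PySem.List.slice xs (some a) (some (a + w)) = [] := by
  apply List.eq_nil_of_length_eq_zero
  rw [PySem.List.length_slice]
  simp only [PySem.List.clampIdx]
  split_ifs <;> omega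

-- per-row equality
theorem row_eq (bits : List Bool) (width shard labelWidth row : Int) (hw0 : width ≠ 0)
    (hrow : 0 ≤ row)
    (hlt : row < PySem.Int.floordiv ((bits.length : ℤ) + width - 1) width) :
    rowLineA bits width shard labelWidth row
      = pyRJust labelWidth (PySem.Int.toChars (shard + row * width)) ++ [' ']
          ++ pyLJust width (PySem.List.slice (bits.map cellChar)
              (some (row * width)) (some (row * width + width))) := by
  unfold rowLineA
  have hfun : (fun (line : List Char) (col : Int) =>
      if row * width + col < (bits.length : Int) then
        line ++ [if PySem.List.pyGetD bits (row * width + col) false then '█' else '░']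
      else line ++ [' '])
      = fun line col => line ++
          [if row * width + col < (bits.length : Int) then
            (if PySem.List.pyGetD bits (row * width + col) false then '█' else '░') else ' '] := by
    funext line col; split_ifs <;> rfl
  rw [hfun, PySem.List.foldl_append_singleton_eq_map]
  suffices h : (PySem.List.pyRange 0 width 1).map
      (fun col => if row * width + col < (bits.length : Int) then
        (if PySem.List.pyGetD bits (row * width + col) false then '█' else '░') else ' ')
      = pyLJust width (PySem.List.slice (bits.map cellChar)
          (some (row * width)) (some (row * width + width))) by
    rw [h]
  by_cases hw : 0 < width
  · have hs0 : 0 ≤ row * width := mul_nonneg hrow (le_of_lt hw)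
    obtain ⟨s, hs⟩ : ∃ s : ℕ, (s : ℤ) = row * width := ⟨(row * width).toNat, Int.toNat_of_nonneg hs0⟩
    obtain ⟨w, hww⟩ : ∃ w : ℕ, (w : ℤ) = width := ⟨width.toNat, Int.toNat_of_nonneg (le_of_lt hw)⟩
    rw [← hs, ← hww, PySem.List.slice_natCast_add, PySem.List.pyRange_one, List.map_map,
      show ((w : ℤ) - 0).toNat = w by omega]
    have hmap : ((fun col => if (s : ℤ) + col < (bits.length : Int) then
          (if PySem.List.pyGetD bits ((s : ℤ) + col) false then '█' else '░') else ' ')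
          ∘ fun (k : ℕ) => (0 : ℤ) + (k : ℤ))
        = fun (k : ℕ) => if s + k < bits.length then
            (if bits.getD (s + k) false then '█' else '░') else ' ' := by
      funext k
      have h1 : (s : ℤ) + ((0 : ℤ) + (k : ℤ)) = ((s + k : ℕ) : ℤ) := by push_cast; ring
      simp only [Function.comp, h1, PySem.List.pyGetD_natCast, Nat.cast_lt]
    rw [hmap, row_core]
    unfold pyLJust
    congr 2
    have hlen : (((bits.map cellChar).drop s).take w).length = min w (bits.length - s) := by
      simp [List.length_take, List.length_drop]
    rw [hlen]
    omega
  · -- width < 0: the Python col-loop is empty and the slice is empty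
    have hwneg : width < 0 := by omega
    have hq := PySem.Int.floordiv_mul_add_mod ((bits.length : ℤ) + width - 1) width
    have hm := mod_nonpos_of_neg ((bits.length : ℤ) + width - 1) width hwneg
    have h3 : (PySem.Int.floordiv ((bits.length : ℤ) + width - 1) width - 1) * width
        ≤ row * width := mul_le_mul_of_nonpos_right (by omega) (by omega)
    have h4 : (PySem.Int.floordiv ((bits.length : ℤ) + width - 1) width - 1) * width
        = PySem.Int.floordiv ((bits.length : ℤ) + width - 1) width * width - width := by ring
    have hge : (bits.length : ℤ) ≤ row * width + 1 := by omega
    have ha : row * width ≤ 0 := mul_nonpos_of_nonneg_of_nonpos hrow (by omega)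
    rw [PySem.List.pyRange_one_eq_nil (by omega), List.map_nil,
      slice_nil_of_short _ hwneg ha (by simpa using hge)]
    unfold pyLJust
    simp
    omega

theorem visualize_eq (bits : List Bool) (width shard : Int) (hw0 : width ≠ 0) :
    visualize bits width shard = visualize_alt bits width shard := by
  unfold visualize visualize_alt
  dsimp only
  rw [PySem.List.foldl_append_singleton_eq_map, PySem.List.foldl_append_eq_flatMap,
    join_empty_sep, List.flatMap_def]
  apply congrArg String.ofList
  apply congrArg (PySem.Chars.join ['\n'])
  simp only [List.append_assoc]
  congr 1
  congr 1
  apply List.map_congr_left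
  intro row hrow
  simpa [List.append_assoc] using
    row_eq bits width shard _ row hw0 (PySem.List.mem_pyRange_one.mp hrow).1
      (PySem.List.mem_pyRange_one.mp hrow).2

-- ===== VERDICT (by name: the statement is the Claim_ definition above) =====
theorem visualize_spec : Claim_equal_visualize := by
  intro bits width shard _ hpre
  unfold Spec_visualize
  exact visualize_eq bits width shard hpre
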